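-- pv_equiv track=rewrite | github.com/Michellie/HW1 | prob2.py | primeFactorisation
-- ===== SOURCE A (Python) =====
-- def primeFactorisation (k):
--     outputList = []
--     for i in range(11, k + 1, 2):
--         count = 0
--         for j in range(2, i+1):
--             if (i % j) == 0 and i != j:
--                 count += 1
--         if count == 0:
--             outputList.append(i)
--     return outputList
-- ===== SOURCE B (Python) =====
-- def primeFactorisation(k):
--     # Trial division by odd divisors up to sqrt(i) instead of counting all divisors up to i.
--     def _is_prime_odd(i):
--         d = 3
--         while d * d <= i:
--             if i % d == 0:
--                 return False
--             d += 2
--         return True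
--     return [i for i in range(11, k + 1, 2) if _is_prime_odd(i)]
-- ===== Notes on version B (the rewrite author's own statement) =====
-- stated objective: faster
-- what changed: Replaces counting every divisor of each candidate up to i with trial division by odd divisors only up to sqrt(i), with early exit on the first divisor found.
import Mathlib
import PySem

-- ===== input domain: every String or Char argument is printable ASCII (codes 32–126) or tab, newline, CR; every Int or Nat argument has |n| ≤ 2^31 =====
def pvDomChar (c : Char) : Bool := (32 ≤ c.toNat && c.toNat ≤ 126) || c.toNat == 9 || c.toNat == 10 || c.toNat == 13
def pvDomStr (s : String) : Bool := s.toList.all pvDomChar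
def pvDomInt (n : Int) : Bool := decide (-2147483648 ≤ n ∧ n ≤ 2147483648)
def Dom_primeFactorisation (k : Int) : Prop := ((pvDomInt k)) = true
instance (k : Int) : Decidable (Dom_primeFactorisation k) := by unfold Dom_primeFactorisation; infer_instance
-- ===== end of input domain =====

-- B replaces A's full divisor count (all j in [2, i]) by trial division by odd d with d*d ≤ i: faster (asymptotic).

-- ===== PORT A =====
def primeFactorisation (k : Int) : List Int :=
  (PySem.List.pyRange 11 (k + 1) 2).foldl
    (fun outputList i =>
      let count : Int :=
        (PySem.List.pyRange 2 (i + 1) 1).foldl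
          (fun count j => if PySem.Int.mod i j = 0 ∧ i ≠ j then count + 1 else count) 0
      if count = 0 then outputList ++ [i] else outputList)
    []

-- ===== PORT B =====
-- the 'while d*d <= i' loop of Source B's _is_prime_odd
def isPrimeOddGo (i d : Int) : Bool :=
  if h : d * d ≤ i then
    if PySem.Int.mod i d = 0 then false
    else isPrimeOddGo i (d + 2)
  else true
termination_by (i + 1 - d).toNat
decreasing_by
  have hdi : d ≤ i := by nlinarith
  omega

def primeFactorisation_alt (k : Int) : List Int :=
  (PySem.List.pyRange 11 (k + 1) 2).filter (fun i => isPrimeOddGo i 3)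

-- ===== PRECONDITION & SPEC =====
def Spec_primeFactorisation (k : Int) (out : List Int) : Prop := out = primeFactorisation_alt k
instance (k : Int) (out : List Int) : Decidable (Spec_primeFactorisation k out) := by unfold Spec_primeFactorisation; infer_instance

-- ===== CLAIM (what is proved, stated in full; the proofs are below) =====
def Claim_equal_primeFactorisation : Prop := ∀ (k : Int), Dom_primeFactorisation k → Spec_primeFactorisation k (primeFactorisation k)

-- ===== LEMMAS AND PROOFS =====

theorem isPrimeOddGo_eq_true_iff (i d : Int) (hd : 0 ≤ d) :
    isPrimeOddGo i d = true ↔ ∀ e : Int, d ≤ e → (2 ∣ e - d) → e * e ≤ i → ¬ e ∣ i := by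
  revert hd
  induction d using isPrimeOddGo.induct i with
  | case1 d h hmod =>
    intro hd
    rw [PySem.Int.mod_eq_zero_iff_dvd] at hmod
    rw [isPrimeOddGo, dif_pos h, if_pos (PySem.Int.mod_eq_zero_iff_dvd i d |>.mpr hmod)]
    constructor
    · intro hfalse; exact absurd hfalse (by simp)
    · intro hall; exact absurd hmod (hall d le_rfl ⟨0, by ring⟩ h)
  | case2 d h hmod ih =>
    intro hd
    rw [isPrimeOddGo, dif_pos h, if_neg hmod]
    rw [ih (by omega)]
    constructor
    · intro hall e he h2 hsq
      rcases eq_or_lt_of_le he with rfl | hlt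
      · rw [PySem.Int.mod_eq_zero_iff_dvd] at hmod; exact fun hdvd => hmod hdvd
      · exact hall e (by omega) (by omega) hsq
    · intro hall e he h2 hsq
      exact hall e (by omega) (by omega) hsq
  | case3 d h =>
    intro hd
    rw [isPrimeOddGo, dif_neg h]
    simp only [true_iff]
    intro e he _ hsq hdvd
    have : d * d ≤ e * e := mul_le_mul he he hd (by omega)
    omega

theorem countA_eq_zero_iff (i : Int) :
    ((PySem.List.pyRange 2 (i + 1) 1).foldl
        (fun count j => if PySem.Int.mod i j = 0 ∧ i ≠ j then count + 1 else count) (0 : Int)) = 0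
      ↔ ∀ j : Int, 2 ≤ j → j ≤ i → j ∣ i → i = j := by
  rw [PySem.List.foldl_ite_add_one]
  simp only [zero_add, Int.natCast_eq_zero, List.countP_eq_zero]
  constructor
  · intro hall j h2 hji hdvd
    by_contra hne
    have hj : j ∈ PySem.List.pyRange 2 (i + 1) 1 := by
      rw [PySem.List.mem_pyRange_one]; omega
    have := hall j hj
    simp [PySem.Int.mod_eq_zero_iff_dvd, hdvd] at this
    exact hne this
  · intro hall j hj
    rw [PySem.List.mem_pyRange_one] at hj
    simp only [decide_eq_true_eq, not_and, ne_eq, not_not]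
    intro hmod
    rw [PySem.Int.mod_eq_zero_iff_dvd] at hmod
    exact hall j hj.1 (by omega) hmod

theorem tests_agree (i : Int) (h11 : 11 ≤ i) (hodd : 2 ∣ i - 11) :
    (∀ j : Int, 2 ≤ j → j ≤ i → j ∣ i → i = j) ↔
    (∀ e : Int, 3 ≤ e → (2 ∣ e - 3) → e * e ≤ i → ¬ e ∣ i) := by
  constructor
  · intro hall e h3 _ hsq hdvd
    have hei : e ≤ i := by nlinarith
    have := hall e (by omega) hei hdvd
    nlinarith
  · intro hall j h2 hji hdvd
    by_contra hne
    obtain ⟨q, hq⟩ := hdvd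
    have hqpos : 0 < q := by nlinarith
    have hq1 : q ≠ 1 := by intro h; rw [h, mul_one] at hq; exact hne hq
    have hq2 : 2 ≤ q := by omega
    have hjdvd : j ∣ i := ⟨q, hq⟩
    have hqdvd : q ∣ i := ⟨j, by linarith [hq, mul_comm j q]⟩
    have hiodd : ¬ (2 : Int) ∣ i := by omega
    have hm : ∀ m : Int, 2 ≤ m → m ∣ i → 3 ≤ m ∧ 2 ∣ m - 3 := by
      intro m h2m hmdvd
      have : ¬ (2 : Int) ∣ m := fun h => hiodd (h.trans hmdvd)
      omega
    rcases le_total j q with hle | hle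
    · have hsq : j * j ≤ i := by nlinarith
      obtain ⟨h3, hpar⟩ := hm j h2 hjdvd
      exact hall j h3 hpar hsq hjdvd
    · have hsq : q * q ≤ i := by nlinarith
      obtain ⟨h3, hpar⟩ := hm q hq2 hqdvd
      exact hall q h3 hpar hsq hqdvd

-- ===== VERDICT (by name: the statement is the Claim_ definition above) =====
theorem primeFactorisation_spec : Claim_equal_primeFactorisation := by
  intro k _
  unfold Spec_primeFactorisation primeFactorisation primeFactorisation_alt
  rw [PySem.List.foldl_congr_mem (g := fun acc i => if isPrimeOddGo i 3 = true then acc ++ [i] else acc)]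
  · rw [PySem.List.foldl_append_ite_eq_filter]
    simp
  · intro acc i hi
    rw [PySem.List.mem_pyRange_iff_of_pos (by norm_num)] at hi
    obtain ⟨h11, _, hodd⟩ := hi
    have : ((PySem.List.pyRange 2 (i + 1) 1).foldl
        (fun count j => if PySem.Int.mod i j = 0 ∧ i ≠ j then count + 1 else count) (0 : Int)) = 0
        ↔ isPrimeOddGo i 3 = true := by
      rw [countA_eq_zero_iff, isPrimeOddGo_eq_true_iff i 3 (by norm_num), tests_agree i h11 hodd]
    simp only []
    split_ifs with h1 h2 h2 <;> try rfl
    · exact absurd (this.mp h1) h2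
    · exact absurd (this.mpr h2) h1
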